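-- pv_equiv track=rewrite | github.com/HoangHiep01/yolov7-plate_license_detection | main.py | reoder_sample
-- ===== SOURCE A (Python) =====
-- def reoder_sample(list_point, list_center_y):
--   thres = sum(list_center_y) // len(list_center_y)
--   list_top_row = []
--   list_down_row = []
--
--   for point in list_point:
--     if (point[1] + point[3]) // 2 < thres:
--       list_top_row.append(point)
--     else:
--       list_down_row.append(point)
--
--   list_point = sorted(list_top_row, key=lambda x:x[0]) + sorted(list_down_row, key=lambda x:x[0])
--   return list_point
-- ===== SOURCE B (Python) =====
-- def reoder_sample(list_point, list_center_y):
--   thres = sum(list_center_y) // len(list_center_y)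
--   return sorted(list_point,
--                 key=lambda p: (0 if (p[1] + p[3]) // 2 < thres else 1, p[0]))
-- ===== Notes on version B (the rewrite author's own statement) =====
-- stated objective: idiomatic
-- what changed: Replaces the explicit two-bucket partition loop plus two separate sorts and concatenation with a single stable sort over all points using a composite (row, x) key.
import Mathlib
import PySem

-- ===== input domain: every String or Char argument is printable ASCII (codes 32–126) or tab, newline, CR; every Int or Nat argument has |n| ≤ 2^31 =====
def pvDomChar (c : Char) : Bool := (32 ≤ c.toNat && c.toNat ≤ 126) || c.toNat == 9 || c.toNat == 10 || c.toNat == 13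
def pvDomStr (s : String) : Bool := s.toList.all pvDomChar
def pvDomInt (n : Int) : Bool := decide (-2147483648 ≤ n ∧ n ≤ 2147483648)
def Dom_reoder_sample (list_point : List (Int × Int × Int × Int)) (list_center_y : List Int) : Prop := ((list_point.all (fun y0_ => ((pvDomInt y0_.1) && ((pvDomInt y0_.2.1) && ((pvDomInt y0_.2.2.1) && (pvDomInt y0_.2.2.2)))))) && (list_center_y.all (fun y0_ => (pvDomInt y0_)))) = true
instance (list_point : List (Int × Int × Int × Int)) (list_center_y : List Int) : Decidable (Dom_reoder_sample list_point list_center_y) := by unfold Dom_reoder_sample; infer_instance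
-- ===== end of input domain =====

-- B replaces A's explicit two-bucket partition plus two separate sorts and concatenation
-- with a single stable sort under a composite (row, x) key (more idiomatic; same cost).


-- ===== PORT A =====
def reoder_sample (list_point : List (Int × Int × Int × Int)) (list_center_y : List Int) : List (Int × Int × Int × Int) :=
  let thres := PySem.Int.floordiv list_center_y.sum (list_center_y.length : Int)
  let rows := list_point.foldl (fun acc point =>
      if PySem.Int.floordiv (point.2.1 + point.2.2.2) 2 < thres then (acc.1 ++ [point], acc.2)
      else (acc.1, acc.2 ++ [point])) ([], [])
  PySem.List.sorted rows.1 (fun x => x.1) ++ PySem.List.sorted rows.2 (fun x => x.1)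

-- ===== PORT B =====
def reoder_sample_alt (list_point : List (Int × Int × Int × Int)) (list_center_y : List Int) : List (Int × Int × Int × Int) :=
  let thres := PySem.Int.floordiv list_center_y.sum (list_center_y.length : Int)
  PySem.List.sorted2 list_point
    (fun p => if PySem.Int.floordiv (p.2.1 + p.2.2.2) 2 < thres then (0 : Int) else 1)
    (fun p => p.1)

-- ===== PRECONDITION & SPEC =====
-- Pre_ excludes only list_center_y = [], where A raises ZeroDivisionError.
def Pre_reoder_sample (_list_point : List (Int × Int × Int × Int)) (list_center_y : List Int) : Prop := list_center_y ≠ []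
instance (list_point : List (Int × Int × Int × Int)) (list_center_y : List Int) : Decidable (Pre_reoder_sample list_point list_center_y) := by unfold Pre_reoder_sample; infer_instance
def pvWitness_reoder_sample : (List (Int × Int × Int × Int)) × List Int := ([(1, 2, 3, 4), (5, 60, 7, 80)], [3, 50])

def Spec_reoder_sample (list_point : List (Int × Int × Int × Int)) (list_center_y : List Int) (out : List (Int × Int × Int × Int)) : Prop := out = reoder_sample_alt list_point list_center_y
instance (list_point : List (Int × Int × Int × Int)) (list_center_y : List Int) (out : List (Int × Int × Int × Int)) : Decidable (Spec_reoder_sample list_point list_center_y out) := by unfold Spec_reoder_sample; infer_instance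

-- ===== CLAIM (what is proved, stated in full; the proofs are below) =====
def Claim_equal_reoder_sample : Prop := ∀ (list_point : List (Int × Int × Int × Int)) (list_center_y : List Int), Dom_reoder_sample list_point list_center_y → Pre_reoder_sample list_point list_center_y → Spec_reoder_sample list_point list_center_y (reoder_sample list_point list_center_y)

-- ===== LEMMAS AND PROOFS =====

-- the lexicographic comparator sorted2 uses, with row key (0 if P, else 1) and x key k2
def pvLex {α : Type} (P : α → Bool) (k2 : α → Int) : α → α → Bool := fun a b =>
  decide ((if P a then (0 : Int) else 1) < (if P b then (0 : Int) else 1)) ||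
  (!decide ((if P b then (0 : Int) else 1) < (if P a then (0 : Int) else 1)) && decide (k2 a < k2 b))

-- inserting a top-row element into (sorted tops ++ sorted downs) stays inside the top block
theorem pv_ins_top {α : Type} (P : α → Bool) (k2 : α → Int) (x : α) (T D : List α)
    (hx : P x = true) (hT : ∀ t ∈ T, P t = true) (hD : ∀ d ∈ D, P d = false) :
    PySem.List.insertBy (pvLex P k2) x (T ++ D) =
      PySem.List.insertBy (fun a b => decide (k2 a < k2 b)) x T ++ D := by
  induction T with
  | nil =>
    cases D with
    | nil => simp [PySem.List.insertBy]
    | cons d D' =>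
      have hd := hD d (by simp)
      simp [PySem.List.insertBy, pvLex, hx, hd]
  | cons t T' ih =>
    have ht := hT t (by simp)
    have hle : pvLex P k2 x t = decide (k2 x < k2 t) := by
      simp [pvLex, hx, ht]
    by_cases h : k2 x < k2 t
    · simp [PySem.List.insertBy, hle, h]
    · have := ih (fun a ha => hT a (by simp [ha]))
      simp [PySem.List.insertBy, hle, h, this]

-- inserting a down-row element into (sorted tops ++ sorted downs) walks past all tops
theorem pv_ins_down {α : Type} (P : α → Bool) (k2 : α → Int) (x : α) (T D : List α)
    (hx : P x = false) (hT : ∀ t ∈ T, P t = true) (hD : ∀ d ∈ D, P d = false) :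
    PySem.List.insertBy (pvLex P k2) x (T ++ D) =
      T ++ PySem.List.insertBy (fun a b => decide (k2 a < k2 b)) x D := by
  induction T with
  | nil =>
    induction D with
    | nil => simp [PySem.List.insertBy]
    | cons d D' ihD =>
      have hd := hD d (by simp)
      have hle : pvLex P k2 x d = decide (k2 x < k2 d) := by
        simp [pvLex, hx, hd]
      by_cases h : k2 x < k2 d
      · simp [PySem.List.insertBy, hle, h]
      · have := ihD (fun a ha => hD a (by simp [ha]))
        simp [PySem.List.insertBy, hle, h] at this ⊢
        exact this
  | cons t T' ih =>
    have ht := hT t (by simp)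
    have hle : pvLex P k2 x t = false := by
      simp [pvLex, hx, ht]
    have := ih (fun a ha => hT a (by simp [ha]))
    simp [PySem.List.insertBy, hle, this]

-- A's partition loop over a pair accumulator is append-of-filters
theorem pv_partition {α : Type} (P : α → Bool) (xs : List α) (t0 d0 : List α) :
    xs.foldl (fun acc p => if P p then (acc.1 ++ [p], acc.2) else (acc.1, acc.2 ++ [p])) (t0, d0) =
      (t0 ++ xs.filter P, d0 ++ xs.filter (fun p => !P p)) := by
  induction xs generalizing t0 d0 with
  | nil => simp
  | cons x xs ih =>
    by_cases h : P x
    · simp [h, ih]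
    · simp [h, ih]

-- the heart: a stable sort by the lexicographic (row, x) key equals
-- (stable sort of the tops by x) ++ (stable sort of the downs by x)
theorem pv_split_sort {α : Type} (P : α → Bool) (k2 : α → Int) (xs : List α) :
    xs.foldl (fun acc x => PySem.List.insertBy (pvLex P k2) x acc) [] =
      PySem.List.sorted (xs.filter P) (fun y => k2 y) ++
      PySem.List.sorted (xs.filter (fun p => !P p)) (fun y => k2 y) := by
  induction xs using List.reverseRecOn with
  | nil => simp [PySem.List.sorted]
  | append_singleton xs x ih =>
    rw [List.foldl_append, List.foldl_cons, List.foldl_nil, ih]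
    have memT : ∀ t ∈ PySem.List.sorted (xs.filter P) (fun y => k2 y), P t = true := by
      intro t ht
      have := (PySem.List.mem_sorted _ _ _ _).1 ht
      exact (List.mem_filter.1 this).2
    have memD : ∀ d ∈ PySem.List.sorted (xs.filter (fun p => !P p)) (fun y => k2 y), P d = false := by
      intro d hd
      have := (List.mem_filter.1 ((PySem.List.mem_sorted _ _ _ _).1 hd)).2
      simpa using this
    by_cases h : P x
    · rw [pv_ins_top P k2 x _ _ h memT memD]
      rw [List.filter_append, List.filter_append]
      simp [h, PySem.List.sorted_eq_foldl_insertBy, List.foldl_append]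
    · rw [pv_ins_down P k2 x _ _ (by simpa using h) memT memD]
      rw [List.filter_append, List.filter_append]
      simp [h, PySem.List.sorted_eq_foldl_insertBy, List.foldl_append]

-- ===== VERDICT (by name: the statement is the Claim_ definition above) =====
theorem reoder_sample_spec : Claim_equal_reoder_sample := by
  intro lp lcy _ _
  unfold Spec_reoder_sample reoder_sample reoder_sample_alt
  set thres := PySem.Int.floordiv lcy.sum (lcy.length : Int) with hth
  set P : (Int × Int × Int × Int) → Bool :=
    fun p => decide (PySem.Int.floordiv (p.2.1 + p.2.2.2) 2 < thres) with hP
  have hpart := pv_partition P lp [] []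
  have hsplit := pv_split_sort P (fun p => p.1) lp
  simp only [PySem.List.sorted2]
  simp only [List.nil_append] at hpart
  -- identify the if-based fold/keys with the P-based ones
  have e1 : (fun (acc : List _ × List _) point =>
      if PySem.Int.floordiv (point.2.1 + point.2.2.2) 2 < thres then (acc.1 ++ [point], acc.2)
      else (acc.1, acc.2 ++ [point])) =
      (fun acc p => if P p then (acc.1 ++ [p], acc.2) else (acc.1, acc.2 ++ [p])) := by
    funext acc p; simp [hP]
  have e2 : (fun a b : Int × Int × Int × Int =>
      decide ((if PySem.Int.floordiv (a.2.1 + a.2.2.2) 2 < thres then (0:Int) else 1) <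
              (if PySem.Int.floordiv (b.2.1 + b.2.2.2) 2 < thres then (0:Int) else 1)) ||
      (!decide ((if PySem.Int.floordiv (b.2.1 + b.2.2.2) 2 < thres then (0:Int) else 1) <
               (if PySem.Int.floordiv (a.2.1 + a.2.2.2) 2 < thres then (0:Int) else 1)) &&
       decide (a.1 < b.1))) = pvLex P (fun p => p.1) := by
    funext a b
    by_cases ha : P a = true <;> by_cases hb : P b = true <;>
      simp only [pvLex, hP] at ha hb ⊢ <;> simp [ha, hb]
  rw [e1, hpart]
  rw [if_neg (by simp : ¬ (false = true)), e2, hsplit]
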